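-- pv_equiv track=rewrite | github.com/rawi124/mini_projet_HAMMING_HUFMAN | codage_canal.py | codage_canal
-- ===== SOURCE A (Python) =====
-- def codage_canal(G, v ):
--     """
--     fait la multiplication de v.G
--     pour avoir le mot c = v.G
--     """
--     j = 0
--     c = []
--     k = len(G[0])
--     n = len(v)
--     while j < k :
--         s = 0
--         i = 0
--         while i < n :
--             s = s + (G[i][j] * v[i])
--             i += 1
--         c.append(s%2)
--         j+= 1
--     return c
--
-- G=[[1, 1, 1, 0, 0, 0, 0],[1, 0, 0, 1, 1, 0, 0],[0, 1, 0, 1, 0, 1, 0],[1, 1, 0, 1, 0, 0, 1]]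
-- ===== SOURCE B (Python) =====
-- def codage_canal(G, v):
--     """
--     fait la multiplication de v.G
--     pour avoir le mot c = v.G
--     """
--     c = [0] * len(G[0])
--     for vi, row in zip(v, G):
--         if vi % 2:
--             c = [(cj + g) % 2 for cj, g in zip(c, row)]
--     return c
-- ===== Notes on version B (the rewrite author's own statement) =====
-- stated objective: alternative
-- what changed: B works over GF(2) directly: it keeps the output as an always-reduced bit vector and, skipping rows whose coefficient v[i] is even, folds each remaining row into it by componentwise addition mod 2 (a row-XOR), with no multiplications, no per-coordinate dot products and no final reduction pass; A computes each coordinate as an integer dot product with nested while loops and reduces it mod 2 at the end.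
import Mathlib
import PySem

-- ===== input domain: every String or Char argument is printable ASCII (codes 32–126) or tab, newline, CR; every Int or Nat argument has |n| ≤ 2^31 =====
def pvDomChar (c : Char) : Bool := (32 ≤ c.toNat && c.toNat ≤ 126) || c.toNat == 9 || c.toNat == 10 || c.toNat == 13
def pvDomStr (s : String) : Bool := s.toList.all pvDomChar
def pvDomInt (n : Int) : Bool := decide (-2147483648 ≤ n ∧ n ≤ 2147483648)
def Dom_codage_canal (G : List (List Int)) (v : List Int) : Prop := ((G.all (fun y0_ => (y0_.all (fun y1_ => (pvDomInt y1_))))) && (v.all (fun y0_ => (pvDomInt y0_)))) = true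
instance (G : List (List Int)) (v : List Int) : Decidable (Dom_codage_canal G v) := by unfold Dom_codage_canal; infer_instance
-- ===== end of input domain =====

-- B folds the rows with an odd coefficient v[i] into an always-reduced GF(2) accumulator
-- (componentwise addition mod 2, no multiplications); A computes each coordinate as an
-- integer dot product and reduces it mod 2 at the end. Return values only.

-- ===== PORT A =====
-- A: outer while over columns j < k = len(G[0]); inner while sums G[i][j]*v[i]; append s % 2.
def codage_canal (G : List (List Int)) (v : List Int) : List Int :=
  (List.range (G.headD []).length).map (fun j =>
    PySem.Int.mod
      ((List.range v.length).foldl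
        (fun s i => s + (G.getD i []).getD j 0 * v.getD i 0) 0) 2)

-- ===== PORT B =====
-- B: c starts as [0]*len(G[0]); for each (vi, row) in zip(v, G) with vi % 2 truthy,
-- c becomes [(cj + g) % 2 for cj, g in zip(c, row)]; return c.
def codage_canal_alt (G : List (List Int)) (v : List Int) : List Int :=
  (v.zip G).foldl
    (fun c p =>
      if PySem.Int.mod p.1 2 ≠ 0 then
        (c.zip p.2).map (fun q => PySem.Int.mod (q.1 + q.2) 2)
      else c)
    (List.replicate (G.headD []).length 0)

-- ===== PRECONDITION & SPEC =====
-- Pre_ excludes exactly the inputs where the Python A raises IndexError: an empty G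
-- (len(G[0])), and — when k > 0 — a v longer than G or a used row shorter than k.
def Pre_codage_canal (G : List (List Int)) (v : List Int) : Prop :=
  G ≠ [] ∧ ((G.headD []).length = 0 ∨
    (v.length ≤ G.length ∧ ∀ i ∈ List.range v.length, (G.headD []).length ≤ (G.getD i []).length))
instance (G : List (List Int)) (v : List Int) : Decidable (Pre_codage_canal G v) := by
  unfold Pre_codage_canal; infer_instance
def pvWitness_codage_canal : List (List Int) × List Int := ([[1, 1, 0], [0, 1, 1]], [1, 1])

def Spec_codage_canal (G : List (List Int)) (v : List Int) (out : List Int) : Prop := out = codage_canal_alt G v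
instance (G : List (List Int)) (v : List Int) (out : List Int) : Decidable (Spec_codage_canal G v out) := by unfold Spec_codage_canal; infer_instance

-- ===== CLAIM (what is proved, stated in full; the proofs are below) =====
def Claim_equal_codage_canal : Prop := ∀ (G : List (List Int)) (v : List Int), Dom_codage_canal G v → Pre_codage_canal G v → Spec_codage_canal G v (codage_canal G v)

-- ===== LEMMAS AND PROOFS =====

-- invariant: after folding the first m rows, B's accumulator is the mod-2 reduction of
-- A's partial dot products, one entry per column j < k
theorem pv_acc (G : List (List Int)) (v : List Int) (k m : Nat)
    (hlen : ∀ i, i < m → min k (G.getD i []).length = k) :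
    (List.range m).foldl
      (fun c i =>
        if PySem.Int.mod (v.getD i 0) 2 ≠ 0 then
          (c.zip (G.getD i [])).map (fun p => PySem.Int.mod (p.1 + p.2) 2)
        else c)
      (List.replicate k 0)
    = (List.range k).map (fun j =>
        PySem.Int.mod
          ((List.range m).foldl (fun s i => s + (G.getD i []).getD j 0 * v.getD i 0) 0) 2) := by
  induction m with
  | zero =>
    simp
  | succ m ih =>
    have hlen' : ∀ i, i < m → min k (G.getD i []).length = k := fun i hi => hlen i (by omega)
    simp only [List.range_succ, List.foldl_append, List.foldl_cons, List.foldl_nil, ih hlen']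
    have hmod : ∀ a : Int, PySem.Int.mod a 2 = a % 2 :=
      fun a => PySem.Int.mod_eq_emod_of_pos (by omega)
    by_cases hv : PySem.Int.mod (v.getD m 0) 2 ≠ 0
    · have hv1 : v.getD m 0 % 2 = 1 := by
        rw [hmod] at hv; omega
      simp only [if_pos hv]
      apply List.ext_getElem
      · have h : min k ((G[m]?).getD []).length = k := hlen m (by omega)
        have h2 : (G.getD m []).length = ((G[m]?).getD []).length := rfl
        simp only [List.length_map, List.length_zip, List.length_range]
        omega
      · intro j h1 h2
        have hj : j < k := by simpa using h2
        simp only [List.getElem_map, List.getElem_zip, List.getElem_range, hmod]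
        rw [Int.add_emod _ ((G.getD m []).getD j 0 * v.getD m 0), Int.mul_emod, hv1]
        have hrow : j < (G.getD m []).length := by
          have := hlen m (by omega); omega
        rw [List.getD_eq_getElem _ _ hrow]
        omega
    · simp only [if_neg hv]
      have hv0 : v.getD m 0 % 2 = 0 := by
        rw [hmod, not_not] at hv; exact hv
      refine List.map_congr_left (fun j hj => ?_)
      simp only [hmod]
      rw [Int.add_emod _ ((G.getD m []).getD j 0 * v.getD m 0), Int.mul_emod, hv0]
      omega

-- B's zip traversal, rewritten as an index fold over range (min |v| |G|)
theorem pv_zip_eq (v : List Int) (G : List (List Int)) :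
    v.zip G = (List.range (min v.length G.length)).map (fun i => (v.getD i 0, G.getD i [])) := by
  apply List.ext_getElem
  · simp
  · intro i h1 h2
    have hi1 : i < v.length := by simp at h1; omega
    have hi2 : i < G.length := by simp at h1; omega
    simp only [List.getElem_zip, List.getElem_map, List.getElem_range]
    rw [List.getD_eq_getElem _ _ hi1, List.getD_eq_getElem _ _ hi2]

-- an empty accumulator stays empty through B's fold
theorem pv_fold_nil (l : List (Int × List Int)) :
    l.foldl
      (fun c p =>
        if PySem.Int.mod p.1 2 ≠ 0 then
          (c.zip p.2).map (fun q => PySem.Int.mod (q.1 + q.2) 2)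
        else c)
      ([] : List Int) = [] := by
  induction l with
  | nil => rfl
  | cons p l ih => simp only [List.foldl_cons]; split <;> simpa using ih

theorem codage_canal_eq (G : List (List Int)) (v : List Int) (hpre : Pre_codage_canal G v) :
    codage_canal G v = codage_canal_alt G v := by
  obtain ⟨-, hk⟩ := hpre
  unfold codage_canal codage_canal_alt
  rcases hk with h0 | ⟨hvG, hrow⟩
  · rw [h0]
    simp only [List.replicate, List.range_zero, List.map_nil]
    exact (pv_fold_nil _).symm
  · rw [pv_zip_eq, List.foldl_map]
    have hmin : min v.length G.length = v.length := by omega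
    rw [hmin, pv_acc]
    intro i hi
    have := hrow i (by simpa using hi)
    omega

-- ===== VERDICT (by name: the statement is the Claim_ definition above) =====
theorem codage_canal_spec : Claim_equal_codage_canal := by
  intro G v _ hpre
  exact codage_canal_eq G v hpre
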